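-- pv_equiv track=rewrite | github.com/FelipePassos09/Curso-em-Video-Python-mod3 | Exercícios/Ex#100.py | somapar
-- ===== SOURCE A (Python) =====
-- def somapar(num: list):
--   'função para somar os pares'
--   par = imp = cpar = cimpar = 0
--   for i in num:
--     if i % 2 == 0:
--       par += i
--       cpar += 1
--     else:
--       imp += i
--       cimpar += 1
--   return par, imp, cpar, cimpar
-- ===== SOURCE B (Python) =====
-- def somapar(num: list):
--   'função para somar os pares'
--   pares = [i for i in num if i % 2 == 0]
--   impares = [i for i in num if i % 2 != 0]
--   return sum(pares), sum(impares), len(pares), len(impares)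
-- ===== Notes on version B (the rewrite author's own statement) =====
-- stated objective: alternative
-- what changed: A's single fused loop maintaining four accumulators is replaced by two filter passes (evens/odds) followed by sum/len reductions on each filtered list.
import Mathlib
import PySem

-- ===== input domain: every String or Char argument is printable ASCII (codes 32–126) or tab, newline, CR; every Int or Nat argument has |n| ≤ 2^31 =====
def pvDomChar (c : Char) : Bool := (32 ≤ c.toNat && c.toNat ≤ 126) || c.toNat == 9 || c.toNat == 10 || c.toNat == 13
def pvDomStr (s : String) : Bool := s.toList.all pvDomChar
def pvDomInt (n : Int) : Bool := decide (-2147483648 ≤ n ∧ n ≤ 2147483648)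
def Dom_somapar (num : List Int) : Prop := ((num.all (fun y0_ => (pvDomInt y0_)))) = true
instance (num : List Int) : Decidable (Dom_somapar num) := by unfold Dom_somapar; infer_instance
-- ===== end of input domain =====

-- B replaces A's fused four-accumulator loop with two filter passes plus sum/len reductions (objective: alternative decomposition).

-- ===== PORT A =====
-- single loop updating four accumulators, branching on i % 2 == 0
def somapar (num : List Int) : Int × Int × Int × Int :=
  num.foldl
    (fun st i =>
      let (par, imp, cpar, cimpar) := st
      if PySem.Int.mod i 2 = 0 then (par + i, imp, cpar + 1, cimpar)
      else (par, imp + i, cpar, cimpar + 1))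
    (0, 0, 0, 0)

-- ===== PORT B =====
-- two filtered lists, then sum and length of each
def somapar_alt (num : List Int) : Int × Int × Int × Int :=
  let pares := num.filter (fun i => PySem.Int.mod i 2 = 0)
  let impares := num.filter (fun i => ¬ PySem.Int.mod i 2 = 0)
  (pares.sum, impares.sum, (pares.length : Int), (impares.length : Int))

-- ===== PRECONDITION & SPEC =====
def Spec_somapar (num : List Int) (out : Int × Int × Int × Int) : Prop := out = somapar_alt num
instance (num : List Int) (out : Int × Int × Int × Int) : Decidable (Spec_somapar num out) := by unfold Spec_somapar; infer_instance

-- ===== CLAIM (what is proved, stated in full; the proofs are below) =====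
def Claim_equal_somapar : Prop := ∀ (num : List Int), Dom_somapar num → Spec_somapar num (somapar num)

-- ===== LEMMAS AND PROOFS =====

theorem somapar_foldl_inv (num : List Int) (p m cp cm : Int) :
    num.foldl
      (fun st i =>
        let (par, imp, cpar, cimpar) := st
        if PySem.Int.mod i 2 = 0 then (par + i, imp, cpar + 1, cimpar)
        else (par, imp + i, cpar, cimpar + 1))
      (p, m, cp, cm)
    = (p + (num.filter (fun i => PySem.Int.mod i 2 = 0)).sum,
       m + (num.filter (fun i => ¬ PySem.Int.mod i 2 = 0)).sum,
       cp + ((num.filter (fun i => PySem.Int.mod i 2 = 0)).length : Int),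
       cm + ((num.filter (fun i => ¬ PySem.Int.mod i 2 = 0)).length : Int)) := by
  induction num generalizing p m cp cm with
  | nil => simp
  | cons a t ih =>
    simp only [List.foldl_cons, List.filter_cons]
    by_cases h : PySem.Int.mod a 2 = 0
    · rw [if_pos h, ih]
      simp only [h, decide_true, not_true_eq_false, decide_false, if_true]
      simp [List.sum_cons]
      constructor
      · ring
      · ring
    · rw [if_neg h, ih]
      simp only [h, decide_false, not_false_eq_true, decide_true]
      simp [List.sum_cons]
      constructor
      · ring
      · ring

-- ===== VERDICT (by name: the statement is the Claim_ definition above) =====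
theorem somapar_spec : Claim_equal_somapar := by
  intro num _
  unfold Spec_somapar somapar somapar_alt
  rw [somapar_foldl_inv]
  simp
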